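-- pv_equiv track=rewrite | github.com/lengshuijing/research-project-team-management | グループ３　成果/DNA_Group/Code/converter_airforce.py | check_string_allowed
-- ===== SOURCE A (Python) =====
-- def check_string_allowed(s):
--     """
--     Check if the string is allowed based on the inferred rules:
--     - Each new letter must appear in alphabetical order of first-time appearances.
--     - Once a letter has appeared, it can appear in any order.
--     """
--     seen = set()
--     highest = None
--
--     for char in s:
--         if char == '#':
--             continue
--
--         if char not in seen:
--             seen.add(char)
--             if highest is None:
--                 highest = char
--             else:
--                 # Check alphabetical order for first introductions
--                 if char < highest:
--                     return False
--                 highest = char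
--         # If already seen, no new constraints.
--
--     return True
-- ===== SOURCE B (Python) =====
-- def check_string_allowed(s):
--     seen = set()
--     firsts = []
--     for ch in s:
--         if ch != '#' and ch not in seen:
--             seen.add(ch)
--             firsts.append(ch)
--     return firsts == sorted(firsts)
-- ===== Notes on version B (the rewrite author's own statement) =====
-- stated objective: simpler
-- what changed: B collects the distinct non-skipped characters in order of first appearance and returns whether that list equals its sorted copy, replacing A's incremental watermark-and-early-return pass.
import Mathlib
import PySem

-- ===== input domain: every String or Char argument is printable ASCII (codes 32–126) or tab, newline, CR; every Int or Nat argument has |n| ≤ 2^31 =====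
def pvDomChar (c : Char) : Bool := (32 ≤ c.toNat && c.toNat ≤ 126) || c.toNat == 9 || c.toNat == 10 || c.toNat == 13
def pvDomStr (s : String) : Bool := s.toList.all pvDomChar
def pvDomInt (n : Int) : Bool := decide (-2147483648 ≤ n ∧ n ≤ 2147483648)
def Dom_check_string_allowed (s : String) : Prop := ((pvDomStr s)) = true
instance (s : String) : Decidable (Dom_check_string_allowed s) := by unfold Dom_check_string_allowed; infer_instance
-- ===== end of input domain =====

-- B collects the distinct non-skipped characters in first-appearance order and compares that list with its sorted copy,
-- replacing A's incremental watermark-and-early-return pass (objective: simpler decomposition, same asymptotics).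


-- ===== PORT A =====
-- loop of A: state = (seen, highest), early 'return False' becomes returning false
def pvGoA : List Char → PySem.Set Char → Option Char → Bool
  | [], _, _ => true
  | c :: rest, seen, highest =>
    if c = '#' then pvGoA rest seen highest
    else if ¬ (PySem.Set.contains seen c = true) then
      let seen' := PySem.Set.add seen c
      match highest with
      | none => pvGoA rest seen' (some c)
      | some h => if c < h then false else pvGoA rest seen' (some c)
    else pvGoA rest seen highest

def check_string_allowed (s : String) : Bool :=
  pvGoA s.toList PySem.Set.empty none

-- ===== PORT B =====
-- loop of B: collect first appearances of non-'#' characters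
def pvGoB : List Char → PySem.Set Char → List Char → List Char
  | [], _, firsts => firsts
  | c :: rest, seen, firsts =>
    if c ≠ '#' ∧ ¬ (PySem.Set.contains seen c = true) then
      pvGoB rest (PySem.Set.add seen c) (firsts ++ [c])
    else pvGoB rest seen firsts

def check_string_allowed_alt (s : String) : Bool :=
  let firsts := pvGoB s.toList PySem.Set.empty []
  firsts == PySem.List.sorted firsts (fun x => x) false

-- ===== PRECONDITION & SPEC =====
def Spec_check_string_allowed (s : String) (out : Bool) : Prop := out = check_string_allowed_alt s
instance (s : String) (out : Bool) : Decidable (Spec_check_string_allowed s out) := by unfold Spec_check_string_allowed; infer_instance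

-- ===== CLAIM (what is proved, stated in full; the proofs are below) =====
def Claim_equal_check_string_allowed : Prop := ∀ (s : String), Dom_check_string_allowed s → Spec_check_string_allowed s (check_string_allowed s)

-- ===== LEMMAS AND PROOFS =====

-- pvGoB only ever appends to the accumulator
theorem pvGoB_append (l : List Char) : ∀ (seen : PySem.Set Char) (f : List Char),
    ∃ t, pvGoB l seen f = f ++ t := by
  induction l with
  | nil => intro seen f; exact ⟨[], by simp [pvGoB]⟩
  | cons c rest ih =>
    intro seen f
    by_cases h : c ≠ '#' ∧ ¬ (PySem.Set.contains seen c = true)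
    · obtain ⟨t, ht⟩ := ih (PySem.Set.add seen c) (f ++ [c])
      refine ⟨[c] ++ t, ?_⟩
      show pvGoB (c :: rest) seen f = f ++ ([c] ++ t)
      rw [pvGoB, if_pos h, ht, List.append_assoc]
    · obtain ⟨t, ht⟩ := ih seen f
      refine ⟨t, ?_⟩
      show pvGoB (c :: rest) seen f = f ++ t
      rw [pvGoB, if_neg h, ht]

-- in a strictly increasing list every element is at most the last one
theorem last_max : ∀ (f : List Char) (h : Char), f.Pairwise (· < ·) →
    f.getLast? = some h → ∀ x ∈ f, x ≤ h := by
  intro f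
  induction f with
  | nil => simp
  | cons a t ih =>
    intro h hp hl x hx
    cases t with
    | nil =>
      simp at hl hx; simp [hx, hl]
    | cons b t' =>
      have hl' : (b :: t').getLast? = some h := by
        simpa [List.getLast?_cons_cons] using hl
      rcases List.mem_cons.mp hx with rfl | hx'
      · exact le_of_lt (List.rel_of_pairwise_cons hp (List.mem_of_getLast? hl'))
      · exact ih h (List.Pairwise.of_cons hp) hl' x hx'

-- the main correspondence between A's pass and B's collected list
theorem main_equiv (l : List Char) : ∀ (seen : PySem.Set Char) (f : List Char),
    f.Pairwise (· < ·) → (∀ c ∈ f, c ∈ seen) →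
    pvGoA l seen f.getLast? = decide ((pvGoB l seen f).Pairwise (· < ·)) := by
  induction l with
  | nil =>
    intro seen f hpair _
    simp [pvGoA, pvGoB, hpair]
  | cons c rest ih =>
    intro seen f hpair hsub
    by_cases hhash : c = '#'
    · have hnc : ¬ (c ≠ '#' ∧ ¬ (PySem.Set.contains seen c = true)) := by simp [hhash]
      rw [pvGoA, if_pos hhash, pvGoB, if_neg hnc]
      exact ih seen f hpair hsub
    · by_cases hseen : PySem.Set.contains seen c = true
      · have hnc : ¬ (c ≠ '#' ∧ ¬ (PySem.Set.contains seen c = true)) := fun hc => hc.2 hseen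
        rw [pvGoA, if_neg hhash, if_neg (not_not_intro hseen), pvGoB, if_neg hnc]
        exact ih seen f hpair hsub
      · have hcond : c ≠ '#' ∧ ¬ (PySem.Set.contains seen c = true) := ⟨hhash, hseen⟩
        have hcmem : c ∉ (seen : List Char) := fun hm =>
          hseen ((PySem.Set.contains_iff seen c).mpr hm)
        have hsub' : ∀ x ∈ f ++ [c], x ∈ PySem.Set.add seen c := by
          intro x hx
          rw [PySem.Set.mem_add]
          rcases List.mem_append.mp hx with hx | hx
          · exact Or.inl (hsub x hx)
          · simp at hx; exact Or.inr hx
        rw [pvGoB, if_pos hcond]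
        cases hl : f.getLast? with
        | none =>
          have hf : f = [] := by
            cases f with
            | nil => rfl
            | cons a t => simp at hl
          subst hf
          rw [pvGoA, if_neg hhash, if_pos hseen]
          show pvGoA rest (PySem.Set.add seen c) (some c) =
            decide ((pvGoB rest (PySem.Set.add seen c) ([] ++ [c])).Pairwise (· < ·))
          have := ih (PySem.Set.add seen c) [c] (by simp) (by intro x hx; exact hsub' x (by simpa using hx))
          simpa using this
        | some h =>
          have hmemh : h ∈ f := List.mem_of_getLast? hl
          rw [pvGoA, if_neg hhash, if_pos hseen]
          show (if c < h then false else pvGoA rest (PySem.Set.add seen c) (some c)) =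
            decide ((pvGoB rest (PySem.Set.add seen c) (f ++ [c])).Pairwise (· < ·))
          by_cases hlt : c < h
          · -- A returns false; B's list is already out of order and stays so
            rw [if_pos hlt]
            obtain ⟨t, ht⟩ := pvGoB_append rest (PySem.Set.add seen c) (f ++ [c])
            have hbad : ¬ (pvGoB rest (PySem.Set.add seen c) (f ++ [c])).Pairwise (· < ·) := by
              rw [ht]
              intro hp
              have hp1 : (f ++ [c]).Pairwise (· < ·) := (List.pairwise_append.mp hp).1
              have hhc : h < c :=
                (List.pairwise_append.mp hp1).2.2 h hmemh c (List.mem_singleton.mpr rfl)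
              exact absurd hlt (not_lt.mpr (le_of_lt hhc))
            simp [hbad]
          · -- A continues with highest = c
            rw [if_neg hlt]
            have hhc : h < c := by
              have hle : h ≤ c := not_lt.mp hlt
              have hne : h ≠ c := fun he => hcmem (he ▸ hsub h hmemh)
              exact lt_of_le_of_ne hle hne
            have hpair' : (f ++ [c]).Pairwise (· < ·) := by
              rw [List.pairwise_append]
              refine ⟨hpair, by simp, ?_⟩
              intro x hx y hy
              simp at hy; subst hy
              exact lt_of_le_of_lt (last_max f h hpair hl x hx) hhc
            have := ih (PySem.Set.add seen c) (f ++ [c]) hpair' hsub'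
            simpa [List.getLast?_concat] using this

-- pvGoB preserves distinctness when the accumulator is inside seen
theorem pvGoB_nodup (l : List Char) : ∀ (seen : PySem.Set Char) (f : List Char),
    f.Nodup → (∀ c ∈ f, c ∈ seen) → (pvGoB l seen f).Nodup := by
  induction l with
  | nil => intro seen f hn _; simpa [pvGoB] using hn
  | cons c rest ih =>
    intro seen f hn hsub
    by_cases hcond : c ≠ '#' ∧ ¬ (PySem.Set.contains seen c = true)
    · rw [pvGoB, if_pos hcond]
      have hcf : c ∉ f := fun hm =>
        hcond.2 ((PySem.Set.contains_iff seen c).mpr (hsub c hm))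
      refine ih _ _ ?_ ?_
      · rw [List.nodup_append]
        refine ⟨hn, List.nodup_singleton c, ?_⟩
        intro a ha b hb
        rw [List.mem_singleton] at hb
        subst hb
        exact fun he => hcf (he ▸ ha)
      · intro x hx
        rw [PySem.Set.mem_add]
        rcases List.mem_append.mp hx with hx | hx
        · exact Or.inl (hsub x hx)
        · simp at hx; exact Or.inr hx
    · rw [pvGoB, if_neg hcond]
      exact ih seen f hn hsub

-- for a duplicate-free list, equality with the sorted copy is exactly strict sortedness
theorem eq_sorted_iff_pairwise (f : List Char) (hn : f.Nodup) :
    (f == PySem.List.sorted f (fun x => x) false) = decide (f.Pairwise (· < ·)) := by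
  by_cases hp : f.Pairwise (· < ·)
  · have hs : PySem.List.sorted f (fun x => x) false = f :=
      PySem.List.sorted_eq_of_perm_of_pairwise_lt f f (fun x => x) (List.Perm.refl f) hp
    simp [hs, hp]
  · have hne : f ≠ PySem.List.sorted f (fun x => x) false := by
      intro he
      apply hp
      have hle : f.Pairwise (fun a b => a ≤ b) := by
        have := PySem.List.sorted_pairwise f (fun x => x)
        rwa [← he] at this
      have hneq : f.Pairwise (fun a b => a ≠ b) := hn
      exact (hle.and hneq).imp (fun hab => lt_of_le_of_ne hab.1 hab.2)
    simp [hp, hne]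

-- ===== VERDICT (by name: the statement is the Claim_ definition above) =====
theorem check_string_allowed_spec : Claim_equal_check_string_allowed := by
  intro s _
  unfold Spec_check_string_allowed check_string_allowed check_string_allowed_alt
  have h1 := main_equiv s.toList PySem.Set.empty [] (by simp) (by simp [PySem.Set.empty])
  have h2 := pvGoB_nodup s.toList PySem.Set.empty [] (by simp) (by simp [PySem.Set.empty])
  simp only [List.getLast?_nil] at h1
  rw [h1, eq_sorted_iff_pairwise _ h2]
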